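-- pv_equiv track=rewrite | github.com/elf004-star/cq-obsidian-skills | scripts/markdown-processor scripts/process_markdown.py | remove_empty_lines
-- ===== SOURCE A (Python) =====
-- def remove_empty_lines(content: str) -> str:
--     """Remove excessive empty lines (more than 2 consecutive)."""
--     lines = content.split('\n')
--     result = []
--     empty_count = 0
--     for line in lines:
--         if not line.strip():
--             empty_count += 1
--             if empty_count <= 2:
--                 result.append(line)
--         else:
--             empty_count = 0
--             result.append(line)
--     return '\n'.join(result)
-- ===== SOURCE B (Python) =====
-- def remove_empty_lines(content: str) -> str:
--     """Remove excessive empty lines (more than 2 consecutive)."""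
--     lines = content.split('\n')
--     out = []
--     i = 0
--     n = len(lines)
--     while i < n:
--         blank = not lines[i].strip()
--         j = i + 1
--         while j < n and (not lines[j].strip()) == blank:
--             j += 1
--         run = lines[i:j]
--         out.extend(run[:2] if blank else run)
--         i = j
--     return '\n'.join(out)
-- ===== Notes on version B (the rewrite author's own statement) =====
-- stated objective: alternative
-- what changed: Instead of a line-by-line scan maintaining a running empty-line counter, B partitions the split lines into maximal runs of blank vs non-blank lines and emits run[:2] for each blank run and the whole run otherwise.
import Mathlib
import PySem

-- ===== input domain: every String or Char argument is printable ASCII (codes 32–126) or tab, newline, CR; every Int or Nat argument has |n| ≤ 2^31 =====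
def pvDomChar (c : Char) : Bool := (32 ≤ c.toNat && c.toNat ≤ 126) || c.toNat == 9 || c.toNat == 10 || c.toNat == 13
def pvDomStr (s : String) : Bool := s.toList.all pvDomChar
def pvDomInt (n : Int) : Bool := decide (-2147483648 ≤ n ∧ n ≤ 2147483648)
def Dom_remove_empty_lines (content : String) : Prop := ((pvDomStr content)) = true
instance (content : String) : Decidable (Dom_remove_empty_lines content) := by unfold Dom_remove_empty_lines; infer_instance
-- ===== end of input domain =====

-- B partitions the split lines into maximal blank/non-blank runs and slices each blank run to
-- its first two lines, instead of A's running empty-line counter; same O(n) cost (objective: alternative).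


-- `not line.strip()` in both programs: the line is blank (empty after stripping whitespace)
def pvBlank (l : List Char) : Bool := PySem.Chars.strip l == []

-- ===== PORT A =====
def remove_empty_lines (content : String) : String :=
  let lines := PySem.Chars.splitOn content.toList ['\n']
  let st := lines.foldl (fun (st : List (List Char) × Int) line =>
    if pvBlank line then
      -- empty_count += 1; append only while the new count is ≤ 2
      if st.2 + 1 ≤ 2 then (st.1 ++ [line], st.2 + 1) else (st.1, st.2 + 1)
    else (st.1 ++ [line], 0)) ([], 0)
  String.ofList (PySem.Chars.join ['\n'] st.1)

-- ===== PORT B =====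
-- the outer while-loop of Source B: peel off the maximal run starting at the current position
def pvRuns : List (List Char) → List (List Char)
  | [] => []
  | l :: ls =>
    let k := pvBlank l
    let run := l :: ls.takeWhile (fun x => pvBlank x == k)
    let rest := ls.dropWhile (fun x => pvBlank x == k)
    (if k then run.take 2 else run) ++ pvRuns rest
  termination_by ls => ls.length
  decreasing_by
    exact Nat.lt_succ_of_le (List.Sublist.length_le (List.dropWhile_sublist _))

def remove_empty_lines_alt (content : String) : String :=
  String.ofList (PySem.Chars.join ['\n'] (pvRuns (PySem.Chars.splitOn content.toList ['\n'])))

-- ===== PRECONDITION & SPEC =====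
def Spec_remove_empty_lines (content : String) (out : String) : Prop := out = remove_empty_lines_alt content
instance (content : String) (out : String) : Decidable (Spec_remove_empty_lines content out) := by unfold Spec_remove_empty_lines; infer_instance

-- ===== CLAIM (what is proved, stated in full; the proofs are below) =====
def Claim_equal_remove_empty_lines : Prop := ∀ (content : String), Dom_remove_empty_lines content → Spec_remove_empty_lines content (remove_empty_lines content)

-- ===== LEMMAS AND PROOFS =====

-- A's loop, recursively (result built in front instead of an accumulator)
def pvRecA : List (List Char) → Int → List (List Char)
  | [], _ => []
  | l :: ls, c =>
    if pvBlank l then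
      if c + 1 ≤ 2 then l :: pvRecA ls (c + 1) else pvRecA ls (c + 1)
    else l :: pvRecA ls 0

theorem pvFoldl_eq (ls : List (List Char)) : ∀ (acc : List (List Char)) (c : Int),
    (ls.foldl (fun (st : List (List Char) × Int) line =>
      if pvBlank line then
        if st.2 + 1 ≤ 2 then (st.1 ++ [line], st.2 + 1) else (st.1, st.2 + 1)
      else (st.1 ++ [line], 0)) (acc, c)).1 = acc ++ pvRecA ls c := by
  induction ls with
  | nil => intro acc c; simp [pvRecA]
  | cons l ls ih =>
    intro acc c
    rw [List.foldl_cons]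
    dsimp only
    by_cases h1 : pvBlank l = true
    · by_cases h2 : c + 1 ≤ 2
      · rw [if_pos h1, if_pos h2, ih]
        simp [pvRecA, h1, h2]
      · rw [if_pos h1, if_neg h2, ih]
        simp [pvRecA, h1, h2]
    · rw [if_neg h1, ih]
      simp [pvRecA, h1]

theorem pvBlankRun : ∀ (run : List (List Char)) (rest : List (List Char)) (c : Int), 0 ≤ c →
    (∀ x ∈ run, pvBlank x = true) →
    pvRecA (run ++ rest) c = run.take (2 - c).toNat ++ pvRecA rest (c + run.length) := by
  intro run
  induction run with
  | nil => intro rest c _ _; simp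
  | cons x run ih =>
    intro rest c hc hall
    have hx : pvBlank x = true := hall x (by simp)
    have ih' := ih rest (c + 1) (by omega) (fun y hy => hall y (by simp [hy]))
    have hlen : c + ((x :: run).length : Int) = (c + 1) + (run.length : Int) := by
      push_cast [List.length_cons]; ring
    rw [List.cons_append, show pvRecA (x :: (run ++ rest)) c =
        if c + 1 ≤ 2 then x :: pvRecA (run ++ rest) (c + 1) else pvRecA (run ++ rest) (c + 1)
      from by simp [pvRecA, hx], hlen]
    by_cases h2 : c + 1 ≤ 2
    · rw [if_pos h2, ih', show (2 - c).toNat = (2 - (c + 1)).toNat + 1 from by omega]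
      simp
    · rw [if_neg h2, ih', show (2 - c).toNat = 0 from by omega]
      simp
      exact Or.inl (by omega)

theorem pvNonblankRun : ∀ (run : List (List Char)) (rest : List (List Char)) (c : Int), run ≠ [] →
    (∀ x ∈ run, pvBlank x = false) →
    pvRecA (run ++ rest) c = run ++ pvRecA rest 0 := by
  intro run
  induction run with
  | nil => intro _ _ h; exact absurd rfl h
  | cons x run ih =>
    intro rest c _ hall
    have hx : pvBlank x = false := hall x (by simp)
    simp only [List.cons_append, pvRecA, hx, Bool.false_eq_true, if_false]
    rcases run with _ | ⟨y, run⟩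
    · simp
    · rw [ih rest 0 (by simp) (fun z hz => hall z (List.mem_cons_of_mem _ hz))]

theorem pvRecA_start (ls : List (List Char)) (c : Int)
    (h : ∀ l, ls.head? = some l → pvBlank l = false) : pvRecA ls c = pvRecA ls 0 := by
  cases ls with
  | nil => rfl
  | cons l ls => simp [pvRecA, h l rfl]

theorem pvHead_dropWhile {p : List Char → Bool} : ∀ (ls : List (List Char)) (l : List Char),
    (ls.dropWhile p).head? = some l → p l = false := by
  intro ls
  induction ls with
  | nil => intro l h; simp [List.dropWhile] at h
  | cons x ls ih =>
    intro l h
    rw [List.dropWhile_cons] at h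
    by_cases hx : p x
    · exact ih l (by simpa [hx] using h)
    · simp [hx] at h
      subst h
      simpa using hx

theorem pvMain : ∀ (n : Nat) (ls : List (List Char)), ls.length ≤ n → pvRecA ls 0 = pvRuns ls := by
  intro n
  induction n with
  | zero =>
    intro ls h
    rw [List.length_eq_zero_iff.mp (Nat.le_zero.mp h)]
    simp [pvRecA, pvRuns]
  | succ n ih =>
    intro ls hlen
    cases ls with
    | nil => simp [pvRecA, pvRuns]
    | cons l ls =>
      rw [pvRuns]
      set k := pvBlank l with hk
      set run := l :: ls.takeWhile (fun x => pvBlank x == k) with hrun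
      set rest := ls.dropWhile (fun x => pvBlank x == k) with hrest
      have hsplit : l :: ls = run ++ rest := by
        rw [hrun, hrest, List.cons_append, List.takeWhile_append_dropWhile]
      have hrestlen : rest.length ≤ n := by
        rw [hrest]
        have := List.Sublist.length_le (List.dropWhile_sublist (l := ls)
          (p := fun x => pvBlank x == k))
        simp only [List.length_cons] at hlen
        omega
      have hreststart : ∀ x, rest.head? = some x → pvBlank x ≠ k := by
        intro x hx
        have := pvHead_dropWhile (p := fun y => pvBlank y == k) ls x hx
        simpa using this
      by_cases hkk : k = true
      · -- blank run
        have hall : ∀ x ∈ run, pvBlank x = true := by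
          intro x hx
          rcases List.mem_cons.mp hx with h | h
          · rw [h, ← hk]; exact hkk
          · have := List.mem_takeWhile_imp h
            simpa [hkk] using this
        have hstart : ∀ x, rest.head? = some x → pvBlank x = false := by
          intro x hx
          have := hreststart x hx
          rw [hkk] at this
          simpa using this
        rw [hsplit, pvBlankRun run rest 0 le_rfl hall, pvRecA_start rest _ hstart,
          ih rest hrestlen, hkk]
        simp
      · -- non-blank run
        have hkf : k = false := by revert hkk; cases k <;> simp
        have hall : ∀ x ∈ run, pvBlank x = false := by
          intro x hx
          rcases List.mem_cons.mp hx with h | h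
          · rw [h, ← hk]; exact hkf
          · have := List.mem_takeWhile_imp h
            simpa [hkf] using this
        rw [hsplit, pvNonblankRun run rest 0 (by simp [hrun]) hall, ih rest hrestlen, hkf]
        simp

-- ===== VERDICT (by name: the statement is the Claim_ definition above) =====
theorem remove_empty_lines_spec : Claim_equal_remove_empty_lines := by
  intro content _
  unfold Spec_remove_empty_lines remove_empty_lines remove_empty_lines_alt
  dsimp only
  rw [pvFoldl_eq]
  rw [pvMain (PySem.Chars.splitOn content.toList ['\n']).length _ le_rfl]
  simp
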